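-- pv_equiv track=rewrite | github.com/IamHuskar/mccfr_doudizhu | hagongda_code/doudizhu.py | _create_straight
-- ===== SOURCE A (Python) =====
-- def _create_straight(list_of_nums, min_length):
--     # 根据列表创建顺子
--     a = sorted(list_of_nums)
--     lens = len(a)
--     for start in range(0, lens):
--         for end in range(start, lens):
--             if a[end] - a[start] != end - start:
--                 break
--             elif end - start >= min_length - 1:
--                 yield list(range(a[start], a[end] + 1))
-- ===== SOURCE B (Python) =====
-- def _create_straight(list_of_nums, min_length):
--     # One pass splits the sorted list into maximal runs of strictly consecutive
--     # values; then each run emits its qualifying sub-ranges by value arithmetic.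
--     a = sorted(list_of_nums)
--     n = len(a)
--     runs = []
--     i = 0
--     while i < n:
--         j = i
--         while j + 1 < n and a[j + 1] == a[j] + 1:
--             j += 1
--         runs.append((a[i], a[j]))
--         i = j + 1
--     need = max(min_length - 1, 0)
--     for lo, hi in runs:
--         for s in range(lo, hi + 1):
--             for e in range(s + need, hi + 1):
--                 yield list(range(s, e + 1))
-- ===== Notes on version B (the rewrite author's own statement) =====
-- stated objective: alternative
-- what changed: A rescans forward from every start index with a break; B makes one linear pass splitting the sorted list into maximal consecutive runs (recorded as (lo,hi) endpoint pairs) and then emits each run's qualifying ranges purely by value arithmetic, skipping the too-short ends instead of testing them.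
import Mathlib
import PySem

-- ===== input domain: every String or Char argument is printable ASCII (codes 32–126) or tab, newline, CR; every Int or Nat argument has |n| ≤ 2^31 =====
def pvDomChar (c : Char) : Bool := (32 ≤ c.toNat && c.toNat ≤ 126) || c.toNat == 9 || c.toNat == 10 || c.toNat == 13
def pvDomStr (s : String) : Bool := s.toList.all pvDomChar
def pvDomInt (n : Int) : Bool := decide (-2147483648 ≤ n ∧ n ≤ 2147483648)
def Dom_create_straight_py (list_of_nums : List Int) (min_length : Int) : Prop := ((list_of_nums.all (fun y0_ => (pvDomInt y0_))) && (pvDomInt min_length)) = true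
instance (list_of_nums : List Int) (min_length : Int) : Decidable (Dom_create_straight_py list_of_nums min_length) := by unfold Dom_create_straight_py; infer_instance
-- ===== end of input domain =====

-- B replaces A's quadratic scan-with-break per start index by one linear pass that
-- tabulates the maximal consecutive runs and then emits each run's ranges by value
-- arithmetic (objective: alternative decomposition; same output order).

-- ===== PORT A =====
-- inner 'for end in range(start, lens)' with its break, as structural recursion on end
def csInnerA (a : List Int) (start : Nat) (min_length : Int) (e : Nat) : List (List Int) :=
  if _h : e < a.length then
    if PySem.List.pyGetD a (e : Int) 0 - PySem.List.pyGetD a (start : Int) 0 ≠ (e : Int) - (start : Int) then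
      []  -- break
    else
      (if (e : Int) - (start : Int) ≥ min_length - 1 then
        [PySem.List.pyRange (PySem.List.pyGetD a (start : Int) 0) (PySem.List.pyGetD a (e : Int) 0 + 1) 1]
      else []) ++ csInnerA a start min_length (e + 1)
  else []
termination_by a.length - e

def create_straight_py (list_of_nums : List Int) (min_length : Int) : List (List Int) :=
  let a := PySem.List.sorted list_of_nums id false
  (List.range a.length).flatMap (fun start => csInnerA a start min_length start)

-- ===== PORT B =====
-- inner 'while j + 1 < n and a[j+1] == a[j] + 1: j += 1'
def csScan (a : List Int) (j : Nat) : Nat :=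
  if _h : j + 1 < a.length ∧ PySem.List.pyGetD a ((j : Int) + 1) 0 = PySem.List.pyGetD a (j : Int) 0 + 1 then
    csScan a (j + 1)
  else j
termination_by a.length - j

theorem csScan_ge (a : List Int) (j : Nat) : j ≤ csScan a j := by
  rw [csScan]
  split
  · exact le_trans (Nat.le_succ j) (csScan_ge a (j + 1))
  · exact le_refl j
termination_by a.length - j

-- outer 'while i < n' collecting (a[i], a[j]) run endpoints
def csRuns (a : List Int) (i : Nat) : List (Int × Int) :=
  if _h : i < a.length then
    (PySem.List.pyGetD a (i : Int) 0, PySem.List.pyGetD a (csScan a i : Int) 0) :: csRuns a (csScan a i + 1)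
  else []
termination_by a.length - i
decreasing_by have := csScan_ge a i; omega

def create_straight_py_alt (list_of_nums : List Int) (min_length : Int) : List (List Int) :=
  let a := PySem.List.sorted list_of_nums id false
  let need := max (min_length - 1) 0
  (csRuns a 0).flatMap (fun lohi =>
    (PySem.List.pyRange lohi.1 (lohi.2 + 1) 1).flatMap (fun s =>
      (PySem.List.pyRange (s + need) (lohi.2 + 1) 1).map (fun e =>
        PySem.List.pyRange s (e + 1) 1)))

-- ===== PRECONDITION & SPEC =====
def Spec_create_straight_py (list_of_nums : List Int) (min_length : Int) (out : List (List Int)) : Prop := out = create_straight_py_alt list_of_nums min_length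
instance (list_of_nums : List Int) (min_length : Int) (out : List (List Int)) : Decidable (Spec_create_straight_py list_of_nums min_length out) := by unfold Spec_create_straight_py; infer_instance

-- ===== CLAIM (what is proved, stated in full; the proofs are below) =====
def Claim_equal_create_straight_py : Prop := ∀ (list_of_nums : List Int) (min_length : Int), Dom_create_straight_py list_of_nums min_length → Spec_create_straight_py list_of_nums min_length (create_straight_py list_of_nums min_length)

-- ===== LEMMAS AND PROOFS =====

theorem pyGetD_nat (xs : List Int) (n : Nat) : PySem.List.pyGetD xs (n : Int) 0 = xs.getD n 0 := by
  simp [PySem.List.pyGetD_natCast]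

theorem csInnerA_cons (x : Int) (a : List Int) (s : Nat) (ml : Int) (e : Nat) :
    csInnerA (x :: a) (s + 1) ml (e + 1) = csInnerA a s ml e := by
  conv_lhs => rw [csInnerA]
  conv_rhs => rw [csInnerA]
  have h1 : PySem.List.pyGetD (x :: a) ((e + 1 : Nat) : Int) 0 = PySem.List.pyGetD a (e : Int) 0 := by
    rw [pyGetD_nat, pyGetD_nat]; simp
  have h2 : PySem.List.pyGetD (x :: a) ((s + 1 : Nat) : Int) 0 = PySem.List.pyGetD a (s : Int) 0 := by
    rw [pyGetD_nat, pyGetD_nat]; simp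
  have h3 : ((e + 1 : Nat) : Int) - ((s + 1 : Nat) : Int) = (e : Int) - (s : Int) := by push_cast; ring
  have h4 : (e + 1 < (x :: a).length) ↔ (e < a.length) := by simp
  rw [h1, h2, h3]
  by_cases hlt : e < a.length
  · simp only [dif_pos (h4.mpr hlt), dif_pos hlt]
    by_cases hbr : PySem.List.pyGetD a (e : Int) 0 - PySem.List.pyGetD a (s : Int) 0 ≠ (e : Int) - (s : Int)
    · simp only [if_pos hbr]
    · simp only [if_neg hbr]
      rw [csInnerA_cons x a s ml (e + 1)]
  · simp only [dif_neg (fun h => hlt (h4.mp h)), dif_neg hlt]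
termination_by a.length - e

theorem csInnerA_prefix (pre : List Int) (a : List Int) (s : Nat) (ml : Int) (e : Nat) :
    csInnerA (pre ++ a) (pre.length + s) ml (pre.length + e) = csInnerA a s ml e := by
  induction pre with
  | nil => simp
  | cons x pre ih =>
      have : (x :: pre).length + s = (pre.length + s) + 1 := by simp; omega
      rw [this]
      have : (x :: pre).length + e = (pre.length + e) + 1 := by simp; omega
      rw [this]
      rw [List.cons_append, csInnerA_cons, ih]

theorem csScan_cons (x : Int) (a : List Int) (j : Nat) :
    csScan (x :: a) (j + 1) = csScan a j + 1 := by
  conv_lhs => rw [csScan]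
  conv_rhs => rw [csScan]
  have h1 : PySem.List.pyGetD (x :: a) (((j + 1 : Nat) : Int) + 1) 0 = PySem.List.pyGetD a ((j : Int) + 1) 0 := by
    have : (((j + 1 : Nat) : Int) + 1) = ((j + 1 : Nat) : Int) + 1 := rfl
    have e1 : (((j + 1 : Nat) : Int) + 1) = ((j + 2 : Nat) : Int) := by push_cast; ring
    have e2 : ((j : Int) + 1) = ((j + 1 : Nat) : Int) := by push_cast; ring
    rw [e1, e2, pyGetD_nat, pyGetD_nat]; simp
  have h2 : PySem.List.pyGetD (x :: a) ((j + 1 : Nat) : Int) 0 = PySem.List.pyGetD a (j : Int) 0 := by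
    rw [pyGetD_nat, pyGetD_nat]; simp
  rw [h1, h2]
  have h4 : (j + 1 + 1 < (x :: a).length) ↔ (j + 1 < a.length) := by simp
  by_cases hc : j + 1 < a.length ∧ PySem.List.pyGetD a ((j : Int) + 1) 0 = PySem.List.pyGetD a (j : Int) 0 + 1
  · simp only [dif_pos (And.intro (h4.mpr hc.1) hc.2), dif_pos hc]
    exact csScan_cons x a (j + 1)
  · have : ¬ (j + 1 + 1 < (x :: a).length ∧ PySem.List.pyGetD a ((j : Int) + 1) 0 = PySem.List.pyGetD a (j : Int) 0 + 1) := by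
      intro h; exact hc ⟨h4.mp h.1, h.2⟩
    simp only [dif_neg this, dif_neg hc]
termination_by a.length - j

theorem csRuns_cons (x : Int) (a : List Int) (i : Nat) :
    csRuns (x :: a) (i + 1) = csRuns a i := by
  conv_lhs => rw [csRuns]
  conv_rhs => rw [csRuns]
  by_cases hi : i < a.length
  · have hi' : i + 1 < (x :: a).length := by simp; omega
    simp only [dif_pos hi', dif_pos hi]
    rw [csScan_cons]
    have h1 : PySem.List.pyGetD (x :: a) ((i + 1 : Nat) : Int) 0 = PySem.List.pyGetD a (i : Int) 0 := by
      rw [pyGetD_nat, pyGetD_nat]; simp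
    have h2 : PySem.List.pyGetD (x :: a) ((csScan a i + 1 : Nat) : Int) 0 = PySem.List.pyGetD a ((csScan a i : Nat) : Int) 0 := by
      rw [pyGetD_nat, pyGetD_nat]; simp
    rw [h1, h2, csRuns_cons x a (csScan a i + 1)]
  · have : ¬ (i + 1 < (x :: a).length) := by simp; omega
    simp only [dif_neg this, dif_neg hi]
termination_by a.length - i
decreasing_by have := csScan_ge a i; omega

theorem csRuns_prefix (pre : List Int) (a : List Int) (i : Nat) :
    csRuns (pre ++ a) (pre.length + i) = csRuns a i := by
  induction pre with
  | nil => simp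
  | cons x pre ih =>
      have : (x :: pre).length + i = (pre.length + i) + 1 := by simp; omega
      rw [this, List.cons_append, csRuns_cons, ih]

-- characterization of csScan
theorem csScan_spec (a : List Int) (i : Nat) :
    csScan a i < max a.length (i + 1) ∧
    (∀ k, i ≤ k → k < csScan a i → a.getD (k + 1) 0 = a.getD k 0 + 1) ∧
    (csScan a i + 1 < a.length → a.getD (csScan a i + 1) 0 ≠ a.getD (csScan a i) 0 + 1) := by
  rw [csScan]
  by_cases hc : i + 1 < a.length ∧ PySem.List.pyGetD a ((i : Int) + 1) 0 = PySem.List.pyGetD a (i : Int) 0 + 1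
  · simp only [dif_pos hc]
    obtain ⟨h1, h2, h3⟩ := csScan_spec a (i + 1)
    refine ⟨by omega, ?_, h3⟩
    intro k hik hk
    rcases Nat.eq_or_lt_of_le hik with rfl | hik'
    · have hcc := hc.2
      have e2 : ((i : Int) + 1) = ((i + 1 : Nat) : Int) := by push_cast; ring
      rw [e2, pyGetD_nat, pyGetD_nat] at hcc
      exact hcc
    · exact h2 k hik' hk
  · simp only [dif_neg hc]
    refine ⟨by omega, by omega, ?_⟩
    intro hlt
    rcases Decidable.not_and_iff_not_or_not.mp hc with h | h
    · omega
    · have e2 : ((i : Int) + 1) = ((i + 1 : Nat) : Int) := by push_cast; ring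
      rw [e2, pyGetD_nat, pyGetD_nat] at h
      exact h
termination_by a.length - i

theorem run_val (a : List Int) (j : Nat)
    (hrun : ∀ k, 0 ≤ k → k < j → a.getD (k + 1) 0 = a.getD k 0 + 1) :
    ∀ k, k ≤ j → a.getD k 0 = a.getD 0 0 + k := by
  intro k hk
  induction k with
  | zero => simp
  | succ m ih =>
      rw [hrun m (by omega) (by omega), ih (by omega)]
      push_cast; ring

-- csInnerA on a consecutive run, as a pyRange of emissions
theorem innerA_run (a : List Int) (ml : Int) (lo : Int) (j : Nat) (hj : j < a.length)
    (hval : ∀ k, k ≤ j → a.getD k 0 = lo + k)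
    (hbrk : j + 1 < a.length → a.getD (j + 1) 0 ≠ lo + ((j : Int) + 1))
    (s e : Nat) (hse : s ≤ e) (hej : e ≤ j + 1) (hsj : s ≤ j) :
    csInnerA a s ml e =
      (PySem.List.pyRange (max (lo + e) (lo + s + max (ml - 1) 0)) (lo + j + 1) 1).map
        (fun ev => PySem.List.pyRange (lo + s) (ev + 1) 1) := by
  rw [csInnerA]
  rcases Nat.lt_or_ge e (j + 1) with he | he
  · -- e ≤ j : no break here
    have helen : e < a.length := by omega
    have hge : a.getD e 0 = lo + e := hval e (by omega)
    have hgs : a.getD s 0 = lo + s := hval s hsj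
    simp only [dif_pos helen, pyGetD_nat, hge, hgs]
    have hnobrk : ¬ (lo + (e : Int) - (lo + (s : Int)) ≠ (e : Int) - (s : Int)) := by omega
    rw [if_neg hnobrk]
    rw [innerA_run a ml lo j hj hval hbrk s (e + 1) (by omega) (by omega) hsj]
    by_cases hcond : (s : Int) + max (ml - 1) 0 ≤ (e : Int)
    · have hc2 : (e : Int) - (s : Int) ≥ ml - 1 := by
        have := le_max_left (ml - 1) (0 : Int); omega
      rw [if_pos hc2]
      have hm1 : max (lo + (e : Int)) (lo + s + max (ml - 1) 0) = lo + e := by omega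
      have hm2 : max (lo + ((e : Nat) + 1 : Nat)) (lo + s + max (ml - 1) 0) = lo + e + 1 := by push_cast; omega
      rw [hm1, hm2]
      conv_rhs => rw [PySem.List.pyRange_one_cons (show lo + (e : Int) < lo + (j : Int) + 1 by push_cast; omega)]
      simp only [List.map_cons, List.singleton_append]
    · have hc2 : ¬ ((e : Int) - (s : Int) ≥ ml - 1) := by
        have h0 : (0 : Int) ≤ (e : Int) - (s : Int) := by omega
        have := le_max_right (ml - 1) (0 : Int)
        intro hge2
        have : ml - 1 ≤ max (ml - 1) 0 := le_max_left _ _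
        omega
      rw [if_neg hc2]
      have hm1 : max (lo + (e : Int)) (lo + s + max (ml - 1) 0) = lo + s + max (ml - 1) 0 := by omega
      have hm2 : max (lo + ((e : Nat) + 1 : Nat)) (lo + s + max (ml - 1) 0) = lo + s + max (ml - 1) 0 := by push_cast; omega
      rw [hm1, hm2, List.nil_append]
  · -- e = j + 1 : break (or end of list)
    have hej' : e = j + 1 := by omega
    subst hej'
    have hnil : PySem.List.pyRange (max (lo + ((j + 1 : Nat) : Int)) (lo + s + max (ml - 1) 0)) (lo + j + 1) 1 = [] := by
      apply PySem.List.pyRange_one_eq_nil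
      have : lo + ((j + 1 : Nat) : Int) ≤ max (lo + ((j + 1 : Nat) : Int)) (lo + s + max (ml - 1) 0) := le_max_left _ _
      push_cast at this ⊢; omega
    rw [hnil, List.map_nil]
    by_cases hlen : j + 1 < a.length
    · simp only [dif_pos hlen, pyGetD_nat]
      have hb := hbrk hlen
      have hgs : a.getD s 0 = lo + s := hval s hsj
      have hgj : a.getD j 0 = lo + j := hval j (le_refl j)
      rw [if_pos]
      rw [hgs]
      intro hcontra
      apply hb
      push_cast at hcontra ⊢
      omega
    · simp only [dif_neg hlen]
termination_by (j + 1) - e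

-- the peeled form of B's emission for one run
theorem flatMap_first_run (a : List Int) (ml : Int) (lo : Int) (j : Nat) (hj : j < a.length)
    (hval : ∀ k, k ≤ j → a.getD k 0 = lo + k)
    (hbrk : j + 1 < a.length → a.getD (j + 1) 0 ≠ lo + ((j : Int) + 1)) :
    (List.range (j + 1)).flatMap (fun s => csInnerA a s ml s) =
      (PySem.List.pyRange lo (lo + (j : Int) + 1) 1).flatMap (fun s =>
        (PySem.List.pyRange (s + max (ml - 1) 0) (lo + (j : Int) + 1) 1).map (fun e =>
          PySem.List.pyRange s (e + 1) 1)) := by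
  rw [PySem.List.pyRange_one]
  have hcnt : (lo + (j : Int) + 1 - lo).toNat = j + 1 := by omega
  rw [hcnt, List.flatMap_map]
  simp only [List.flatMap_def]
  congr 1
  apply List.map_congr_left
  intro s hs
  have hsj : s ≤ j := by simpa using Nat.lt_succ_iff.mp (List.mem_range.mp hs)
  rw [innerA_run a ml lo j hj hval hbrk s s (le_refl s) (by omega) hsj]
  have hm : max (lo + (s : Int)) (lo + s + max (ml - 1) 0) = lo + s + max (ml - 1) 0 := by omega
  rw [hm]

-- main equivalence on an arbitrary list (no sortedness needed)
theorem main_eq (n : Nat) (a : List Int) (ml : Int) (hn : a.length ≤ n) :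
    (List.range a.length).flatMap (fun s => csInnerA a s ml s) =
      (csRuns a 0).flatMap (fun lohi =>
        (PySem.List.pyRange lohi.1 (lohi.2 + 1) 1).flatMap (fun s =>
          (PySem.List.pyRange (s + max (ml - 1) 0) (lohi.2 + 1) 1).map (fun e =>
            PySem.List.pyRange s (e + 1) 1))) := by
  induction n generalizing a with
  | zero =>
      have : a = [] := List.length_eq_zero_iff.mp (by omega)
      subst this
      rw [csRuns]
      simp
  | succ n ih =>
      rcases List.eq_nil_or_concat' a with rfl | _
      · rw [csRuns]; simp
      · have hpos : 0 < a.length := by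
          cases a with
          | nil => simp_all
          | cons x t => simp
        obtain ⟨h1, h2, h3⟩ := csScan_spec a 0
        set j := csScan a 0 with hjdef
        have hj : j < a.length := by omega
        set lo := a.getD 0 0 with hlodef
        have hval : ∀ k, k ≤ j → a.getD k 0 = lo + k :=
          run_val a j (fun k _ hk => h2 k (Nat.zero_le k) hk)
        have hbrk : j + 1 < a.length → a.getD (j + 1) 0 ≠ lo + ((j : Int) + 1) := by
          intro hlt hcontra
          apply h3 hlt
          rw [hcontra, hval j (le_refl j)]
          ring
        -- split off the first run
        set d := a.drop (j + 1) with hddef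
        have hsplit : a = a.take (j + 1) ++ d := (List.take_append_drop (j + 1) a).symm
        have htlen : (a.take (j + 1)).length = j + 1 := by
          rw [List.length_take]; omega
        have hdlen : d.length = a.length - (j + 1) := by
          rw [hddef, List.length_drop]
        -- LHS: split the range of start indices at j + 1
        have hlen : a.length = (j + 1) + (a.length - (j + 1)) := by omega
        rw [hlen, List.range_add, List.flatMap_append, List.flatMap_map]
        have htail : ∀ k, csInnerA a ((j + 1) + k) ml ((j + 1) + k) = csInnerA d k ml k := by
          intro k
          have h := csInnerA_prefix (a.take (j + 1)) d k ml k
          rw [htlen] at h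
          conv_lhs => rw [hsplit]
          exact h
        have htail' :
            (List.range (a.length - (j + 1))).flatMap (fun k => csInnerA a ((j + 1) + k) ml ((j + 1) + k)) =
            (List.range d.length).flatMap (fun s => csInnerA d s ml s) := by
          rw [hdlen]
          simp only [List.flatMap_def]
          congr 1
          exact List.map_congr_left (fun k _ => htail k)
        -- RHS: peel the first run off csRuns
        conv_rhs => rw [csRuns]
        rw [dif_pos hpos]
        have hruns_tail : csRuns a (j + 1) = csRuns d 0 := by
          have h := csRuns_prefix (a.take (j + 1)) d 0
          rw [htlen, Nat.add_zero] at h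
          conv_lhs => rw [hsplit]
          exact h
        simp only [List.flatMap_cons, Nat.cast_zero, ← hjdef]
        rw [hruns_tail, pyGetD_nat]
        have hg0 : PySem.List.pyGetD a 0 0 = lo := by
          have h := pyGetD_nat a 0
          simpa using h
        have hgj : a.getD j 0 = lo + j := hval j (le_refl j)
        rw [hg0, hgj]
        congr 1
        · rw [flatMap_first_run a ml lo j hj hval hbrk]
        · rw [htail']
          exact ih d (by omega)

-- ===== VERDICT (by name: the statement is the Claim_ definition above) =====
theorem create_straight_py_spec : Claim_equal_create_straight_py := by
  intro xs ml _
  unfold Spec_create_straight_py create_straight_py create_straight_py_alt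
  exact main_eq _ _ ml (le_refl _)
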